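-- pv_equiv track=rewrite | github.com/imjinshuo/Word-Closure-Based-MT | scripts/utils/en_utils.py | buildClosure
-- ===== SOURCE A (Python) =====
-- def getMappedWord(maps, ids, original_aligned_ids):
--     aligned_ids = []
--     for id in ids:
--         if id in maps:
--             aligned_ids.extend(maps[id])
--     original_aligned_ids.extend(aligned_ids)
--     if original_aligned_ids:
--         original_aligned_ids = list(set(original_aligned_ids))
--         original_aligned_ids.sort()
--     return original_aligned_ids
--
-- def buildClosure(closure, s_map, s_map_reverse, f_map, f_map_reverse, source2follow, follow2source):
--     original_closure = [[], [], [], []]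
--     while original_closure != closure:
--         original_closure = closure[:]
--         closure[1] = getMappedWord(source2follow, closure[0], closure[1][:])
--         closure[2] = getMappedWord(s_map, closure[0], closure[2][:])
--         closure[0] = getMappedWord(follow2source, closure[1], closure[0][:])
--         closure[3] = getMappedWord(f_map, closure[1], closure[3][:])
--         closure[0] = getMappedWord(s_map_reverse, closure[2], closure[0][:])
--         closure[1] = getMappedWord(f_map_reverse, closure[3], closure[1][:])
--     return closure
-- ===== SOURCE B (Python) =====
-- def buildClosure(closure, s_map, s_map_reverse, f_map, f_map_reverse, source2follow, follow2source):
--     # Worklist saturation: propagate each (component, id) node once along the six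
--     # mapping edges instead of re-scanning whole components every round.
--     comp = [set(closure[i]) for i in range(4)]
--     edges = {0: [(source2follow, 1), (s_map, 2)],
--              1: [(follow2source, 0), (f_map, 3)],
--              2: [(s_map_reverse, 0)],
--              3: [(f_map_reverse, 1)]}
--     stack = [(i, x) for i in range(4) for x in closure[i]]
--     while stack:
--         i, x = stack.pop()
--         for m, d in edges[i]:
--             if x in m:
--                 for y in m[x]:
--                     if y not in comp[d]:
--                         comp[d].add(y)
--                         stack.append((d, y))
--     result = closure[:]
--     for i in range(4):
--         result[i] = sorted(comp[i])
--     return result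
-- ===== Notes on version B (the rewrite author's own statement) =====
-- stated objective: alternative
-- what changed: A re-runs six whole-component re-mapping passes (re-sorting every component) until a global fixpoint; B computes the same closure by a one-pass worklist (BFS) saturation that propagates each (component, id) node once along the six mapping edges and sorts each component once at the end.
import Mathlib
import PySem

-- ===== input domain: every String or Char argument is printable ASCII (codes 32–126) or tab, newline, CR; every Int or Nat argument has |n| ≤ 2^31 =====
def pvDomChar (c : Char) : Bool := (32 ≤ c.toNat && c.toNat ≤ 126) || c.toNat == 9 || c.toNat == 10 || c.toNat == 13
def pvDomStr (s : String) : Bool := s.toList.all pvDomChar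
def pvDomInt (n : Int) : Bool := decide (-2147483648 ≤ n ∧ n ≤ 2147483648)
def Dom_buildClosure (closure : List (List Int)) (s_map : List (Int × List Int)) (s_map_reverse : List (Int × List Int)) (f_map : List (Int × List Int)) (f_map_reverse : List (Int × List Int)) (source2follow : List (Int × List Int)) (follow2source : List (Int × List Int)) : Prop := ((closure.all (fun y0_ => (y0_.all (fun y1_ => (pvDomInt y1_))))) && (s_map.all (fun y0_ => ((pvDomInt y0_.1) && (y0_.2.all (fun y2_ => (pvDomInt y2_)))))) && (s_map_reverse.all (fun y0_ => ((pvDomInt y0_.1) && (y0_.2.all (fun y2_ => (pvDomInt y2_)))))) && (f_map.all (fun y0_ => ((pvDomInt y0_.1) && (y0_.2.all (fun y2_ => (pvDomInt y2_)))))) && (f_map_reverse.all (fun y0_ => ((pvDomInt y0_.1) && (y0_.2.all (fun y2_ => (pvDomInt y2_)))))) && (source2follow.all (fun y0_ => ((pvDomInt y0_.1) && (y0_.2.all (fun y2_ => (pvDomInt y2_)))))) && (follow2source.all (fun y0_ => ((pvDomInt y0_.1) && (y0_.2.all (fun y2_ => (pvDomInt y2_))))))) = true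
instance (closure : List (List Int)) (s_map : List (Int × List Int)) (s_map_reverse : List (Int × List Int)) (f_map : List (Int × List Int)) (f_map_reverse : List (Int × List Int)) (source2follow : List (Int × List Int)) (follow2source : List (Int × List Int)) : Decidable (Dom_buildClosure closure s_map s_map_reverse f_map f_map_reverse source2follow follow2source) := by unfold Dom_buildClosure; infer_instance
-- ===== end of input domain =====

-- B replaces A's repeated whole-closure re-mapping passes by a single worklist (BFS) saturation
-- over (component, id) nodes; same return value (A also mutates its `closure` argument in place,
-- B does not — the equivalence proved here is about the RETURN value only).

-- ===== PORT A =====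
-- shared helper: Python dict lookup on the given association lists (dict built once from the list)
structure EMaps where
  s2f : List (Int × List Int)
  smap : List (Int × List Int)
  f2s : List (Int × List Int)
  fmap : List (Int × List Int)
  smr : List (Int × List Int)
  fmr : List (Int × List Int)

abbrev Comp4A := PySem.Set Int × PySem.Set Int × PySem.Set Int × PySem.Set Int

def dget (m : List (Int × List Int)) (x : Int) : Option (List Int) :=
  (PySem.Dict.ofList m).get? x

def getMappedWord (maps : List (Int × List Int)) (ids : List Int) (original_aligned_ids : List Int) : List Int :=
  let aligned_ids := ids.foldl (fun acc id => if (dget maps id).isSome then acc ++ (dget maps id).getD [] else acc) []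
  let o := original_aligned_ids ++ aligned_ids
  if o = [] then o else PySem.List.sorted (PySem.Set.ofList o) (fun x => x)

-- the six sequential in-place updates of A's loop body, on the first four components
def stepQ (M : EMaps) (q : Comp4A) : Comp4A :=
  let b1 := getMappedWord M.s2f q.1 q.2.1
  let c1 := getMappedWord M.smap q.1 q.2.2.1
  let a1 := getMappedWord M.f2s b1 q.1
  let d1 := getMappedWord M.fmap b1 q.2.2.2
  let a2 := getMappedWord M.smr c1 a1
  let b2 := getMappedWord M.fmr d1 b1
  (a2, b2, c1, d1)

def stepA (M : EMaps) (c : List (List Int)) : List (List Int) :=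
  match c with
  | c0 :: c1 :: c2 :: c3 :: rest =>
      let q := stepQ M (c0, c1, c2, c3)
      q.1 :: q.2.1 :: q.2.2.1 :: q.2.2.2 :: rest
  | _ => c

-- all ids that can ever appear in a component: initial ids plus every mapping value (fuel bound)
def uList (closure : List (List Int)) (M : EMaps) : List Int :=
  closure.flatten ++ (M.s2f ++ M.smap ++ M.f2s ++ M.fmap ++ M.smr ++ M.fmr).flatMap (fun p => p.2)

-- A's while-loop; the fuel only makes it total, `loopA_go` below proves it never runs out
def loopA (M : EMaps) (fuel : Nat) (original c : List (List Int)) : List (List Int) :=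
  if original = c then c
  else
    match fuel with
    | 0 => c
    | fuel + 1 => loopA M fuel c (stepA M c)

def buildClosure (closure : List (List Int)) (s_map : List (Int × List Int)) (s_map_reverse : List (Int × List Int)) (f_map : List (Int × List Int)) (f_map_reverse : List (Int × List Int)) (source2follow : List (Int × List Int)) (follow2source : List (Int × List Int)) : List (List Int) :=
  let M : EMaps := ⟨source2follow, s_map, follow2source, f_map, s_map_reverse, f_map_reverse⟩
  loopA M (4 * (uList closure M).length + 5) [[], [], [], []] closure

-- ===== PORT B =====
def tagOpt (d : Nat) (o : Option (List Int)) : List (Nat × Int) :=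
  match o with
  | none => []
  | some vs => vs.map (fun y => (d, y))

-- the edges table of B: successors of id x living in component i
def succs (M : EMaps) (i : Nat) (x : Int) : List (Nat × Int) :=
  if i = 0 then tagOpt 1 (dget M.s2f x) ++ tagOpt 2 (dget M.smap x)
  else if i = 1 then tagOpt 0 (dget M.f2s x) ++ tagOpt 3 (dget M.fmap x)
  else if i = 2 then tagOpt 0 (dget M.smr x)
  else if i = 3 then tagOpt 1 (dget M.fmr x)
  else []

def getC (c : Comp4A) (d : Nat) : PySem.Set Int :=
  match d with
  | 0 => c.1
  | 1 => c.2.1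
  | 2 => c.2.2.1
  | 3 => c.2.2.2
  | _ => []

def setC (c : Comp4A) (d : Nat) (l : PySem.Set Int) : Comp4A :=
  match d with
  | 0 => (l, c.2.1, c.2.2.1, c.2.2.2)
  | 1 => (c.1, l, c.2.2.1, c.2.2.2)
  | 2 => (c.1, c.2.1, l, c.2.2.2)
  | 3 => (c.1, c.2.1, c.2.2.1, l)
  | _ => c

-- 'if y not in comp[d]: comp[d].add(y); stack.append((d, y))'
def pushNew (st : Comp4A × List (Nat × Int)) (dy : Nat × Int) : Comp4A × List (Nat × Int) :=
  if dy.2 ∈ getC st.1 dy.1 then st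
  else (setC st.1 dy.1 (PySem.Set.add (getC st.1 dy.1) dy.2), dy :: st.2)

-- B's while-stack loop (the worklist order is immaterial to the returned sets);
-- the fuel only makes it total, `bfs_go` below proves it never runs out
def bfs (M : EMaps) (fuel : Nat) (stack : List (Nat × Int)) (c : Comp4A) : Comp4A :=
  match stack with
  | [] => c
  | p :: rest =>
      match fuel with
      | 0 => c
      | fuel + 1 =>
          let st := (succs M p.1 p.2).foldl pushNew (c, rest)
          bfs M fuel st.2 st.1

def buildClosure_alt (closure : List (List Int)) (s_map : List (Int × List Int)) (s_map_reverse : List (Int × List Int)) (f_map : List (Int × List Int)) (f_map_reverse : List (Int × List Int)) (source2follow : List (Int × List Int)) (follow2source : List (Int × List Int)) : List (List Int) :=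
  match closure with
  | z0 :: z1 :: z2 :: z3 :: rest =>
      let M : EMaps := ⟨source2follow, s_map, follow2source, f_map, s_map_reverse, f_map_reverse⟩
      let stack0 := z0.map (fun x => ((0 : Nat), x)) ++ z1.map (fun x => ((1 : Nat), x)) ++ z2.map (fun x => ((2 : Nat), x)) ++ z3.map (fun x => ((3 : Nat), x))
      let fuel := stack0.length + 8 * (uList closure M).length + 1
      let c := bfs M fuel stack0 (PySem.Set.ofList z0, PySem.Set.ofList z1, PySem.Set.ofList z2, PySem.Set.ofList z3)
      PySem.List.sorted c.1 (fun x => x) :: PySem.List.sorted c.2.1 (fun x => x) :: PySem.List.sorted c.2.2.1 (fun x => x) :: PySem.List.sorted c.2.2.2 (fun x => x) :: rest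
  | _ => closure

-- ===== PRECONDITION & SPEC =====
-- Pre_ excludes exactly the inputs where Python A raises IndexError: a closure list with fewer than 4 components.
def Pre_buildClosure (closure : List (List Int)) (s_map : List (Int × List Int)) (s_map_reverse : List (Int × List Int)) (f_map : List (Int × List Int)) (f_map_reverse : List (Int × List Int)) (source2follow : List (Int × List Int)) (follow2source : List (Int × List Int)) : Prop :=
  4 ≤ closure.length
instance (closure : List (List Int)) (s_map : List (Int × List Int)) (s_map_reverse : List (Int × List Int)) (f_map : List (Int × List Int)) (f_map_reverse : List (Int × List Int)) (source2follow : List (Int × List Int)) (follow2source : List (Int × List Int)) : Decidable (Pre_buildClosure closure s_map s_map_reverse f_map f_map_reverse source2follow follow2source) := by unfold Pre_buildClosure; infer_instance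

def pvWitness_buildClosure : List (List Int) × (List (Int × List Int)) × (List (Int × List Int)) × (List (Int × List Int)) × (List (Int × List Int)) × (List (Int × List Int)) × (List (Int × List Int)) :=
  ([[1], [], [], []], [(1, [2])], [], [], [], [(1, [7])], [])

def Spec_buildClosure (closure : List (List Int)) (s_map : List (Int × List Int)) (s_map_reverse : List (Int × List Int)) (f_map : List (Int × List Int)) (f_map_reverse : List (Int × List Int)) (source2follow : List (Int × List Int)) (follow2source : List (Int × List Int)) (out : List (List Int)) : Prop := out = buildClosure_alt closure s_map s_map_reverse f_map f_map_reverse source2follow follow2source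
instance (closure : List (List Int)) (s_map : List (Int × List Int)) (s_map_reverse : List (Int × List Int)) (f_map : List (Int × List Int)) (f_map_reverse : List (Int × List Int)) (source2follow : List (Int × List Int)) (follow2source : List (Int × List Int)) (out : List (List Int)) : Decidable (Spec_buildClosure closure s_map s_map_reverse f_map f_map_reverse source2follow follow2source out) := by unfold Spec_buildClosure; infer_instance

-- ===== CLAIM (what is proved, stated in full; the proofs are below) =====
def Claim_equal_buildClosure : Prop := ∀ (closure : List (List Int)) (s_map : List (Int × List Int)) (s_map_reverse : List (Int × List Int)) (f_map : List (Int × List Int)) (f_map_reverse : List (Int × List Int)) (source2follow : List (Int × List Int)) (follow2source : List (Int × List Int)), Dom_buildClosure closure s_map s_map_reverse f_map f_map_reverse source2follow follow2source → Pre_buildClosure closure s_map s_map_reverse f_map f_map_reverse source2follow follow2source → Spec_buildClosure closure s_map s_map_reverse f_map f_map_reverse source2follow follow2source (buildClosure closure s_map s_map_reverse f_map f_map_reverse source2follow follow2source)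

-- ===== LEMMAS AND PROOFS =====

-- reachability of id y into component d from the initial four components along the six mapping edges
inductive Reach (M : EMaps) (zs : List (List Int)) : Nat → Int → Prop where
  | base (d : Nat) (x : Int) (h : x ∈ zs.getD d []) : Reach M zs d x
  | step {i : Nat} {x : Int} (d : Nat) (y : Int) (hr : Reach M zs i x) (hs : (d, y) ∈ succs M i x) : Reach M zs d y

def EHit (m : List (Int × List Int)) (x y : Int) : Prop := ∃ vs, dget m x = some vs ∧ y ∈ vs

def Sound (M : EMaps) (zs : List (List Int)) (q : Comp4A) : Prop := ∀ dd y, y ∈ getC q dd → Reach M zs dd y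
def InitSub (zs : List (List Int)) (q : Comp4A) : Prop := ∀ dd y, y ∈ zs.getD dd [] → y ∈ getC q dd
def Canon (q : Comp4A) : Prop := ∀ dd, (getC q dd).Pairwise (· < ·)
def SubU (q : Comp4A) (U : List Int) : Prop := ∀ dd y, y ∈ getC q dd → y ∈ U
def ValsSub (M : EMaps) (U : List Int) : Prop := ∀ i x d y, (d, y) ∈ succs M i x → y ∈ U
def szQ (q : Comp4A) : Nat := q.1.length + q.2.1.length + q.2.2.1.length + q.2.2.2.length

@[simp] lemma getC_zero (q : Comp4A) : getC q 0 = q.1 := rfl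
@[simp] lemma getC_one (q : Comp4A) : getC q 1 = q.2.1 := rfl
@[simp] lemma getC_two (q : Comp4A) : getC q 2 = q.2.2.1 := rfl
@[simp] lemma getC_three (q : Comp4A) : getC q 3 = q.2.2.2 := rfl

lemma mem_optGetD (o : Option (List Int)) (y : Int) :
    y ∈ o.getD [] ↔ ∃ vs, o = some vs ∧ y ∈ vs := by
  cases o <;> simp

lemma gMW_eq (m : List (Int × List Int)) (ids orig : List Int) :
    getMappedWord m ids orig =
      (if (orig ++ ids.foldl (fun acc id => if (dget m id).isSome then acc ++ (dget m id).getD [] else acc) []) = []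
       then orig ++ ids.foldl (fun acc id => if (dget m id).isSome then acc ++ (dget m id).getD [] else acc) []
       else PySem.List.sorted (PySem.Set.ofList (orig ++ ids.foldl (fun acc id => if (dget m id).isSome then acc ++ (dget m id).getD [] else acc) [])) (fun x => x)) := rfl

lemma mem_gMW (m : List (Int × List Int)) (ids orig : List Int) (y : Int) :
    y ∈ getMappedWord m ids orig ↔ y ∈ orig ∨ ∃ x, x ∈ ids ∧ EHit m x y := by
  have h : (ids.foldl (fun acc id => if (dget m id).isSome then acc ++ (dget m id).getD [] else acc) []) =
      ids.flatMap (fun id => (dget m id).getD []) := by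
    rw [PySem.List.foldl_congr_mem ids _ (fun acc id => acc ++ (dget m id).getD []) []
      (by intro acc x _; cases hd : dget m x <;> simp [hd])]
    exact PySem.List.foldl_append_eq_flatMap _ _ _
  rw [gMW_eq]
  simp only [h]
  have hmem : y ∈ orig ++ ids.flatMap (fun id => (dget m id).getD []) ↔
      y ∈ orig ∨ ∃ x, x ∈ ids ∧ EHit m x y := by
    simp only [List.mem_append, List.mem_flatMap, mem_optGetD, EHit]
  split
  · exact hmem
  · rw [PySem.List.mem_sorted, PySem.Set.mem_ofList]
    exact hmem

lemma gMW_canon (m : List (Int × List Int)) (ids orig : List Int) :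
    (getMappedWord m ids orig).Pairwise (· < ·) := by
  rw [gMW_eq]
  split
  · rename_i h; rw [h]; exact List.Pairwise.nil
  · exact PySem.List.sorted_ofList_pairwise_lt _

lemma mem_tagOpt (d' : Nat) (o : Option (List Int)) (d : Nat) (y : Int) :
    (d, y) ∈ tagOpt d' o ↔ d = d' ∧ ∃ vs, o = some vs ∧ y ∈ vs := by
  cases o <;> simp [tagOpt, eq_comm, and_comm]

lemma mem_succs_iff (M : EMaps) (i : Nat) (x : Int) (d : Nat) (y : Int) :
    (d, y) ∈ succs M i x ↔
      (i = 0 ∧ ((d = 1 ∧ EHit M.s2f x y) ∨ (d = 2 ∧ EHit M.smap x y))) ∨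
      (i = 1 ∧ ((d = 0 ∧ EHit M.f2s x y) ∨ (d = 3 ∧ EHit M.fmap x y))) ∨
      (i = 2 ∧ d = 0 ∧ EHit M.smr x y) ∨
      (i = 3 ∧ d = 1 ∧ EHit M.fmr x y) := by
  unfold succs
  split_ifs with h0 h1 h2 h3 <;>
    simp_all [mem_tagOpt, EHit, List.mem_append]

lemma succs_lt (M : EMaps) (i : Nat) (x : Int) (d : Nat) (y : Int)
    (h : (d, y) ∈ succs M i x) : d < 4 := by
  rcases (mem_succs_iff M i x d y).1 h with ⟨_, (⟨h, _⟩ | ⟨h, _⟩)⟩ | ⟨_, (⟨h, _⟩ | ⟨h, _⟩)⟩ | ⟨_, h, _⟩ | ⟨_, h, _⟩ <;> omega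

lemma nodup_of_canon {l : List Int} (h : l.Pairwise (· < ·)) : l.Nodup := h.imp ne_of_lt

lemma canon_of_le_nodup {l : List Int} (h1 : l.Pairwise (· ≤ ·)) (h2 : l.Nodup) :
    l.Pairwise (· < ·) := (h1.and h2).imp fun h => lt_of_le_of_ne h.1 h.2

lemma eq_of_canon (l1 l2 : List Int) (h1 : l1.Pairwise (· < ·)) (h2 : l2.Pairwise (· < ·))
    (h : ∀ x, x ∈ l1 ↔ x ∈ l2) : l1 = l2 := by
  have hp : l1.Perm l2 :=
    List.perm_of_nodup_nodup_toFinset_eq (nodup_of_canon h1) (nodup_of_canon h2)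
      (by ext x; simp [h x])
  exact hp.eq_of_pairwise (fun a b _ _ hab hba => le_antisymm hab hba)
    (h1.imp le_of_lt) (h2.imp le_of_lt)

lemma length_le_of_nodup_subset (l u : List Int) (h : l.Nodup) (hs : ∀ x ∈ l, x ∈ u) :
    l.length ≤ u.length := by
  calc l.length = l.toFinset.card := (List.toFinset_card_of_nodup h).symm
    _ ≤ u.toFinset.card := Finset.card_le_card (fun x hx => by
          simp only [List.mem_toFinset] at hx ⊢; exact hs x hx)
    _ ≤ u.length := List.toFinset_card_le u

lemma canon_subset_eq (l l' : List Int) (hs : ∀ x ∈ l, x ∈ l')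
    (c1 : l.Pairwise (· < ·)) (c2 : l'.Pairwise (· < ·)) (hlen : l'.length ≤ l.length) :
    l = l' := by
  have n1 := nodup_of_canon c1
  have n2 := nodup_of_canon c2
  have hfs : l.toFinset = l'.toFinset := by
    apply Finset.eq_of_subset_of_card_le
    · intro x hx; simp only [List.mem_toFinset] at hx ⊢; exact hs x hx
    · rw [List.toFinset_card_of_nodup n1, List.toFinset_card_of_nodup n2]; exact hlen
  refine eq_of_canon l l' c1 c2 (fun x => ?_)
  constructor
  · intro hx; exact hs x hx
  · intro hx
    have : x ∈ l.toFinset := by rw [hfs]; simp [hx]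
    simpa using this

lemma mem_items_foldl_insert (l : List (Int × List Int)) :
    ∀ (d : PySem.Dict Int (List Int)) (p : Int × List Int),
      p ∈ (l.foldl (fun acc q => acc.insert q.1 q.2) d).items → p ∈ d.items ∨ p ∈ l := by
  induction l with
  | nil => intro d p h; exact Or.inl h
  | cons a t ih =>
      intro d p h
      rcases ih _ _ h with h' | h'
      · rcases (PySem.Dict.mem_items_insert _ _ _ _).1 h' with h'' | ⟨h'', _⟩
        · have h3 : p = a := h''
          right; rw [h3]; exact List.mem_cons_self ..
        · exact Or.inl h''
      · exact Or.inr (List.mem_cons_of_mem _ h')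

lemma mem_items_ofList (m : List (Int × List Int)) (p : Int × List Int)
    (h : p ∈ (PySem.Dict.ofList m).items) : p ∈ m := by
  have := mem_items_foldl_insert m PySem.Dict.empty p
    (by simpa [PySem.Dict.ofList, PySem.Dict.update] using h)
  simpa [PySem.Dict.empty] using this

lemma EHit_sub (m : List (Int × List Int)) (x y : Int) (h : EHit m x y) :
    y ∈ m.flatMap (fun p => p.2) := by
  rcases h with ⟨vs, hd, hy⟩
  have hit : (x, vs) ∈ (PySem.Dict.ofList m).items :=
    PySem.Dict.mem_items_of_get?_eq_some _ hd
  exact List.mem_flatMap.2 ⟨(x, vs), mem_items_ofList m _ hit, hy⟩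

-- intro rules for succs membership
lemma succs_in_0l (M : EMaps) (x y : Int) (h : EHit M.s2f x y) : ((1 : Nat), y) ∈ succs M 0 x :=
  (mem_succs_iff M 0 x 1 y).2 (Or.inl ⟨rfl, Or.inl ⟨rfl, h⟩⟩)
lemma succs_in_0r (M : EMaps) (x y : Int) (h : EHit M.smap x y) : ((2 : Nat), y) ∈ succs M 0 x :=
  (mem_succs_iff M 0 x 2 y).2 (Or.inl ⟨rfl, Or.inr ⟨rfl, h⟩⟩)
lemma succs_in_1l (M : EMaps) (x y : Int) (h : EHit M.f2s x y) : ((0 : Nat), y) ∈ succs M 1 x :=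
  (mem_succs_iff M 1 x 0 y).2 (Or.inr (Or.inl ⟨rfl, Or.inl ⟨rfl, h⟩⟩))
lemma succs_in_1r (M : EMaps) (x y : Int) (h : EHit M.fmap x y) : ((3 : Nat), y) ∈ succs M 1 x :=
  (mem_succs_iff M 1 x 3 y).2 (Or.inr (Or.inl ⟨rfl, Or.inr ⟨rfl, h⟩⟩))
lemma succs_in_2 (M : EMaps) (x y : Int) (h : EHit M.smr x y) : ((0 : Nat), y) ∈ succs M 2 x :=
  (mem_succs_iff M 2 x 0 y).2 (Or.inr (Or.inr (Or.inl ⟨rfl, rfl, h⟩)))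
lemma succs_in_3 (M : EMaps) (x y : Int) (h : EHit M.fmr x y) : ((1 : Nat), y) ∈ succs M 3 x :=
  (mem_succs_iff M 3 x 1 y).2 (Or.inr (Or.inr (Or.inr ⟨rfl, rfl, h⟩)))

lemma stepQ_eq (M : EMaps) (q : Comp4A) :
    stepQ M q =
      (getMappedWord M.smr (getMappedWord M.smap q.1 q.2.2.1)
        (getMappedWord M.f2s (getMappedWord M.s2f q.1 q.2.1) q.1),
       getMappedWord M.fmr (getMappedWord M.fmap (getMappedWord M.s2f q.1 q.2.1) q.2.2.2)
        (getMappedWord M.s2f q.1 q.2.1),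
       getMappedWord M.smap q.1 q.2.2.1,
       getMappedWord M.fmap (getMappedWord M.s2f q.1 q.2.1) q.2.2.2) := rfl

lemma mem_getC_cases (q : Comp4A) (dd : Nat) (y : Int) (h : y ∈ getC q dd) :
    (dd = 0 ∧ y ∈ q.1) ∨ (dd = 1 ∧ y ∈ q.2.1) ∨ (dd = 2 ∧ y ∈ q.2.2.1) ∨ (dd = 3 ∧ y ∈ q.2.2.2) := by
  unfold getC at h
  split at h
  · exact Or.inl ⟨rfl, h⟩
  · exact Or.inr (Or.inl ⟨rfl, h⟩)
  · exact Or.inr (Or.inr (Or.inl ⟨rfl, h⟩))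
  · exact Or.inr (Or.inr (Or.inr ⟨rfl, h⟩))
  · simp at h

lemma canon_intro (q : Comp4A) (h0 : q.1.Pairwise (· < ·)) (h1 : q.2.1.Pairwise (· < ·))
    (h2 : q.2.2.1.Pairwise (· < ·)) (h3 : q.2.2.2.Pairwise (· < ·)) : Canon q := by
  intro dd; unfold getC; split <;> first | assumption | exact List.Pairwise.nil

lemma nodup_intro (q : Comp4A) (h0 : q.1.Nodup) (h1 : q.2.1.Nodup)
    (h2 : q.2.2.1.Nodup) (h3 : q.2.2.2.Nodup) : ∀ dd, (getC q dd).Nodup := by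
  intro dd; unfold getC; split <;> first | assumption | exact List.nodup_nil

lemma stepQ_mono (M : EMaps) (q : Comp4A) (dd : Nat) (y : Int)
    (h : y ∈ getC q dd) : y ∈ getC (stepQ M q) dd := by
  rcases mem_getC_cases q dd y h with ⟨rfl, h'⟩ | ⟨rfl, h'⟩ | ⟨rfl, h'⟩ | ⟨rfl, h'⟩
  · rw [getC_zero, stepQ_eq]
    rw [mem_gMW]; left; rw [mem_gMW]; left; exact h'
  · rw [getC_one, stepQ_eq]
    rw [mem_gMW]; left; rw [mem_gMW]; left; exact h'
  · rw [getC_two, stepQ_eq]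
    rw [mem_gMW]; left; exact h'
  · rw [getC_three, stepQ_eq]
    rw [mem_gMW]; left; exact h'

lemma stepQ_closed (M : EMaps) (q : Comp4A) (i : Nat) (x : Int) (dd : Nat) (y : Int)
    (hx : x ∈ getC q i) (hs : (dd, y) ∈ succs M i x) : y ∈ getC (stepQ M q) dd := by
  have hb1 : ∀ z ∈ q.2.1, z ∈ getMappedWord M.s2f q.1 q.2.1 := by
    intro z hz; rw [mem_gMW]; exact Or.inl hz
  rcases (mem_succs_iff M i x dd y).1 hs with
    ⟨hi, (⟨hd, hE⟩ | ⟨hd, hE⟩)⟩ | ⟨hi, (⟨hd, hE⟩ | ⟨hd, hE⟩)⟩ | ⟨hi, hd, hE⟩ | ⟨hi, hd, hE⟩ <;>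
      subst hi <;> subst hd
  · -- 0 → 1 via s2f
    rw [getC_zero] at hx; rw [getC_one, stepQ_eq]
    rw [mem_gMW]; left; rw [mem_gMW]; exact Or.inr ⟨x, hx, hE⟩
  · -- 0 → 2 via smap
    rw [getC_zero] at hx; rw [getC_two, stepQ_eq]
    rw [mem_gMW]; exact Or.inr ⟨x, hx, hE⟩
  · -- 1 → 0 via f2s
    rw [getC_one] at hx; rw [getC_zero, stepQ_eq]
    rw [mem_gMW]; left; rw [mem_gMW]; exact Or.inr ⟨x, hb1 x hx, hE⟩
  · -- 1 → 3 via fmap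
    rw [getC_one] at hx; rw [getC_three, stepQ_eq]
    rw [mem_gMW]; exact Or.inr ⟨x, hb1 x hx, hE⟩
  · -- 2 → 0 via smr
    rw [getC_two] at hx; rw [getC_zero, stepQ_eq]
    rw [mem_gMW]
    refine Or.inr ⟨x, ?_, hE⟩
    rw [mem_gMW]; exact Or.inl hx
  · -- 3 → 1 via fmr
    rw [getC_three] at hx; rw [getC_one, stepQ_eq]
    rw [mem_gMW]
    refine Or.inr ⟨x, ?_, hE⟩
    rw [mem_gMW]; exact Or.inl hx

lemma stepQ_sound (M : EMaps) (zs : List (List Int)) (q : Comp4A)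
    (h : Sound M zs q) : Sound M zs (stepQ M q) := by
  have hb1 : ∀ y ∈ getMappedWord M.s2f q.1 q.2.1, Reach M zs 1 y := by
    intro y hy; rcases (mem_gMW _ _ _ _).1 hy with h' | ⟨x, hx, hE⟩
    · exact h 1 y h'
    · exact Reach.step _ _ (h 0 x hx) (succs_in_0l M x y hE)
  have hc1 : ∀ y ∈ getMappedWord M.smap q.1 q.2.2.1, Reach M zs 2 y := by
    intro y hy; rcases (mem_gMW _ _ _ _).1 hy with h' | ⟨x, hx, hE⟩
    · exact h 2 y h'
    · exact Reach.step _ _ (h 0 x hx) (succs_in_0r M x y hE)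
  have ha1 : ∀ y ∈ getMappedWord M.f2s (getMappedWord M.s2f q.1 q.2.1) q.1, Reach M zs 0 y := by
    intro y hy; rcases (mem_gMW _ _ _ _).1 hy with h' | ⟨x, hx, hE⟩
    · exact h 0 y h'
    · exact Reach.step _ _ (hb1 x hx) (succs_in_1l M x y hE)
  have hd1 : ∀ y ∈ getMappedWord M.fmap (getMappedWord M.s2f q.1 q.2.1) q.2.2.2, Reach M zs 3 y := by
    intro y hy; rcases (mem_gMW _ _ _ _).1 hy with h' | ⟨x, hx, hE⟩
    · exact h 3 y h'
    · exact Reach.step _ _ (hb1 x hx) (succs_in_1r M x y hE)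
  intro dd y hy
  rcases mem_getC_cases _ dd y hy with ⟨rfl, hy'⟩ | ⟨rfl, hy'⟩ | ⟨rfl, hy'⟩ | ⟨rfl, hy'⟩ <;>
    rw [stepQ_eq] at hy'
  · rcases (mem_gMW _ _ _ _).1 hy' with h' | ⟨x, hx, hE⟩
    · exact ha1 y h'
    · exact Reach.step _ _ (hc1 x hx) (succs_in_2 M x y hE)
  · rcases (mem_gMW _ _ _ _).1 hy' with h' | ⟨x, hx, hE⟩
    · exact hb1 y h'
    · exact Reach.step _ _ (hd1 x hx) (succs_in_3 M x y hE)
  · exact hc1 y hy'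
  · exact hd1 y hy'

lemma stepQ_canon (M : EMaps) (q : Comp4A) : Canon (stepQ M q) := by
  rw [stepQ_eq]
  exact canon_intro _ (gMW_canon _ _ _) (gMW_canon _ _ _) (gMW_canon _ _ _) (gMW_canon _ _ _)

lemma stepQ_subU (M : EMaps) (q : Comp4A) (U : List Int) (hv : ValsSub M U)
    (h : SubU q U) : SubU (stepQ M q) U := by
  have hb1 : ∀ y ∈ getMappedWord M.s2f q.1 q.2.1, y ∈ U := by
    intro y hy; rcases (mem_gMW _ _ _ _).1 hy with h' | ⟨x, _, hE⟩
    · exact h 1 y h'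
    · exact hv 0 x 1 y (succs_in_0l M x y hE)
  have hc1 : ∀ y ∈ getMappedWord M.smap q.1 q.2.2.1, y ∈ U := by
    intro y hy; rcases (mem_gMW _ _ _ _).1 hy with h' | ⟨x, _, hE⟩
    · exact h 2 y h'
    · exact hv 0 x 2 y (succs_in_0r M x y hE)
  have ha1 : ∀ y ∈ getMappedWord M.f2s (getMappedWord M.s2f q.1 q.2.1) q.1, y ∈ U := by
    intro y hy; rcases (mem_gMW _ _ _ _).1 hy with h' | ⟨x, _, hE⟩
    · exact h 0 y h'
    · exact hv 1 x 0 y (succs_in_1l M x y hE)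
  have hd1 : ∀ y ∈ getMappedWord M.fmap (getMappedWord M.s2f q.1 q.2.1) q.2.2.2, y ∈ U := by
    intro y hy; rcases (mem_gMW _ _ _ _).1 hy with h' | ⟨x, _, hE⟩
    · exact h 3 y h'
    · exact hv 1 x 3 y (succs_in_1r M x y hE)
  intro dd y hy
  rcases mem_getC_cases _ dd y hy with ⟨rfl, hy'⟩ | ⟨rfl, hy'⟩ | ⟨rfl, hy'⟩ | ⟨rfl, hy'⟩ <;>
    rw [stepQ_eq] at hy'
  · rcases (mem_gMW _ _ _ _).1 hy' with h' | ⟨x, hx, hE⟩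
    · exact ha1 y h'
    · exact hv 2 x 0 y (succs_in_2 M x y hE)
  · rcases (mem_gMW _ _ _ _).1 hy' with h' | ⟨x, hx, hE⟩
    · exact hb1 y h'
    · exact hv 3 x 1 y (succs_in_3 M x y hE)
  · exact hc1 y hy'
  · exact hd1 y hy'

lemma stepA_cons (M : EMaps) (a b c d : List Int) (rest : List (List Int)) :
    stepA M (a :: b :: c :: d :: rest) =
      (stepQ M (a, b, c, d)).1 :: (stepQ M (a, b, c, d)).2.1 ::
      (stepQ M (a, b, c, d)).2.2.1 :: (stepQ M (a, b, c, d)).2.2.2 :: rest := rfl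

lemma szQ_le (q : Comp4A) (U : List Int) (hn : ∀ dd, (getC q dd).Nodup) (hu : SubU q U) :
    szQ q ≤ 4 * U.length := by
  have h0 := length_le_of_nodup_subset q.1 U (hn 0) (fun x hx => hu 0 x hx)
  have h1 := length_le_of_nodup_subset q.2.1 U (hn 1) (fun x hx => hu 1 x hx)
  have h2 := length_le_of_nodup_subset q.2.2.1 U (hn 2) (fun x hx => hu 2 x hx)
  have h3 := length_le_of_nodup_subset q.2.2.2 U (hn 3) (fun x hx => hu 3 x hx)
  unfold szQ; omega

lemma szQ_lt (q q' : Comp4A) (hmono : ∀ dd y, y ∈ getC q dd → y ∈ getC q' dd)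
    (hc : Canon q) (hc' : Canon q') (hne : q' ≠ q) : szQ q + 1 ≤ szQ q' := by
  have l0 := length_le_of_nodup_subset q.1 q'.1 (nodup_of_canon (hc 0)) (fun x hx => hmono 0 x hx)
  have l1 := length_le_of_nodup_subset q.2.1 q'.2.1 (nodup_of_canon (hc 1)) (fun x hx => hmono 1 x hx)
  have l2 := length_le_of_nodup_subset q.2.2.1 q'.2.2.1 (nodup_of_canon (hc 2)) (fun x hx => hmono 2 x hx)
  have l3 := length_le_of_nodup_subset q.2.2.2 q'.2.2.2 (nodup_of_canon (hc 3)) (fun x hx => hmono 3 x hx)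
  by_contra hlt
  push_neg at hlt
  unfold szQ at hlt
  have e0 : q.1 = q'.1 :=
    canon_subset_eq _ _ (fun x hx => hmono 0 x hx) (hc 0) (hc' 0) (by omega)
  have e1 : q.2.1 = q'.2.1 :=
    canon_subset_eq _ _ (fun x hx => hmono 1 x hx) (hc 1) (hc' 1) (by omega)
  have e2 : q.2.2.1 = q'.2.2.1 :=
    canon_subset_eq _ _ (fun x hx => hmono 2 x hx) (hc 2) (hc' 2) (by omega)
  have e3 : q.2.2.2 = q'.2.2.2 :=
    canon_subset_eq _ _ (fun x hx => hmono 3 x hx) (hc 3) (hc' 3) (by omega)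
  exact hne (Prod.ext e0.symm (Prod.ext e1.symm (Prod.ext e2.symm e3.symm)))

lemma complete_of_fixed (M : EMaps) (zs : List (List Int)) (q : Comp4A)
    (hfix : stepQ M q = q) (hinit : InitSub zs q) :
    ∀ dd y, Reach M zs dd y → y ∈ getC q dd := by
  intro dd y h
  induction h with
  | base d x hx => exact hinit d x hx
  | step d y hr hs ih => exact hfix ▸ stepQ_closed M q _ _ d y ih hs

lemma loopA_exit (M : EMaps) (fuel : Nat) (original c : List (List Int)) (h : original = c) :
    loopA M fuel original c = c := by
  cases fuel <;> (rw [loopA]; simp [h])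

lemma loopA_succ (M : EMaps) (fuel : Nat) (original c : List (List Int)) (h : original ≠ c) :
    loopA M (fuel + 1) original c = loopA M fuel c (stepA M c) := by
  rw [loopA]; simp [h]

lemma loopA_go (M : EMaps) (zs : List (List Int)) (U : List Int) (hv : ValsSub M U)
    (rest : List (List Int)) :
    ∀ (fuel : Nat) (oq : List (List Int)) (q : Comp4A),
      InitSub zs q → Sound M zs q → Canon q → SubU q U →
      q.1 :: q.2.1 :: q.2.2.1 :: q.2.2.2 :: rest = stepA M oq →
      4 * U.length + 1 ≤ szQ q + fuel →
      ∃ r : Comp4A, loopA M fuel oq (q.1 :: q.2.1 :: q.2.2.1 :: q.2.2.2 :: rest) =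
          r.1 :: r.2.1 :: r.2.2.1 :: r.2.2.2 :: rest ∧ Canon r ∧
          (∀ dd y, y ∈ getC r dd ↔ Reach M zs dd y) := by
  intro fuel
  induction fuel with
  | zero =>
      intro oq q hinit hsound hcanon hsub hshape hbud
      exfalso
      have := szQ_le q U (fun dd => nodup_of_canon (hcanon dd)) hsub
      omega
  | succ n ih =>
      intro oq q hinit hsound hcanon hsub hshape hbud
      by_cases hfp : stepQ M q = q
      · -- the state is already a fixpoint of the loop body
        have hiff : ∀ dd y, y ∈ getC q dd ↔ Reach M zs dd y := fun dd y =>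
          ⟨fun hy => hsound dd y hy, fun hr => complete_of_fixed M zs q hfp hinit dd y hr⟩
        by_cases heq : oq = q.1 :: q.2.1 :: q.2.2.1 :: q.2.2.2 :: rest
        · exact ⟨q, loopA_exit M _ _ _ heq, hcanon, hiff⟩
        · refine ⟨q, ?_, hcanon, hiff⟩
          rw [loopA_succ M n oq _ heq, stepA_cons, hfp]
          exact loopA_exit M _ _ _ rfl
      · -- the loop body strictly grows the components
        by_cases heq : oq = q.1 :: q.2.1 :: q.2.2.1 :: q.2.2.2 :: rest
        · -- impossible: the current state is the step of the previous one
          exfalso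
          rw [heq, stepA_cons] at hshape
          injection hshape with e0 h1
          injection h1 with e1 h2
          injection h2 with e2 h3
          injection h3 with e3 _
          exact hfp (Prod.ext e0.symm (Prod.ext e1.symm (Prod.ext e2.symm e3.symm)))
        · rw [loopA_succ M n oq _ heq, stepA_cons]
          have hgrow := szQ_lt q (stepQ M q) (stepQ_mono M q) hcanon (stepQ_canon M q) hfp
          exact ih _ (stepQ M q)
            (fun dd y hy => stepQ_mono M q dd y (hinit dd y hy))
            (stepQ_sound M zs q hsound) (stepQ_canon M q) (stepQ_subU M q U hv hsub)
            (stepA_cons M q.1 q.2.1 q.2.2.1 q.2.2.2 rest).symm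
            (by omega)

lemma getC_all_nil (dd : Nat) : getC (([], [], [], []) : Comp4A) dd = [] := by
  unfold getC; split <;> rfl

lemma reach_nil (M : EMaps) (dd : Nat) (y : Int) (h : Reach M [[], [], [], []] dd y) : False := by
  induction h with
  | base d x hx =>
      have he : ([[], [], [], []] : List (List Int)).getD d [] = [] := by
        rcases d with _ | _ | _ | _ | d <;> rfl
      rw [he] at hx
      exact List.not_mem_nil hx
  | step d y hr hs ih => exact ih

lemma mem_getD4 (z0 z1 z2 z3 : List Int) (dd : Nat) (y : Int)
    (h : y ∈ ([z0, z1, z2, z3] : List (List Int)).getD dd []) :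
    (dd = 0 ∧ y ∈ z0) ∨ (dd = 1 ∧ y ∈ z1) ∨ (dd = 2 ∧ y ∈ z2) ∨ (dd = 3 ∧ y ∈ z3) := by
  rcases dd with _ | _ | _ | _ | dd
  · exact Or.inl ⟨rfl, h⟩
  · exact Or.inr (Or.inl ⟨rfl, h⟩)
  · exact Or.inr (Or.inr (Or.inl ⟨rfl, h⟩))
  · exact Or.inr (Or.inr (Or.inr ⟨rfl, h⟩))
  · exact absurd h List.not_mem_nil

lemma valsSub_uList (closure : List (List Int)) (M : EMaps) : ValsSub M (uList closure M) := by
  intro i x d y hs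
  rcases (mem_succs_iff M i x d y).1 hs with
    ⟨_, (⟨_, hE⟩ | ⟨_, hE⟩)⟩ | ⟨_, (⟨_, hE⟩ | ⟨_, hE⟩)⟩ | ⟨_, _, hE⟩ | ⟨_, _, hE⟩ <;>
  · obtain ⟨p, hp, hyp⟩ := List.mem_flatMap.1 (EHit_sub _ _ _ hE)
    refine List.mem_append.2 (Or.inr (List.mem_flatMap.2 ⟨p, ?_, hyp⟩))
    simp only [List.mem_append]
    tauto

lemma init0 (z0 z1 z2 z3 : List Int) :
    InitSub [z0, z1, z2, z3] ((z0, z1, z2, z3) : Comp4A) := by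
  intro dd y hy
  rcases mem_getD4 z0 z1 z2 z3 dd y hy with ⟨rfl, h⟩ | ⟨rfl, h⟩ | ⟨rfl, h⟩ | ⟨rfl, h⟩ <;> exact h

lemma sound0 (M : EMaps) (z0 z1 z2 z3 : List Int) :
    Sound M [z0, z1, z2, z3] ((z0, z1, z2, z3) : Comp4A) := by
  intro dd y hy
  rcases mem_getC_cases _ dd y hy with ⟨rfl, h⟩ | ⟨rfl, h⟩ | ⟨rfl, h⟩ | ⟨rfl, h⟩
  · exact Reach.base 0 y h
  · exact Reach.base 1 y h
  · exact Reach.base 2 y h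
  · exact Reach.base 3 y h

lemma sub0 (z0 z1 z2 z3 : List Int) (rest : List (List Int)) (M : EMaps) :
    SubU ((z0, z1, z2, z3) : Comp4A) (uList (z0 :: z1 :: z2 :: z3 :: rest) M) := by
  intro dd y hy
  refine List.mem_append.2 (Or.inl ?_)
  rcases mem_getC_cases _ dd y hy with ⟨rfl, h⟩ | ⟨rfl, h⟩ | ⟨rfl, h⟩ | ⟨rfl, h⟩ <;>
    simp [List.flatten] <;> tauto

lemma A_char (z0 z1 z2 z3 : List Int) (rest : List (List Int)) (M : EMaps) :
    ∃ r : Comp4A,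
      loopA M (4 * (uList (z0 :: z1 :: z2 :: z3 :: rest) M).length + 5) [[], [], [], []]
          (z0 :: z1 :: z2 :: z3 :: rest) =
        r.1 :: r.2.1 :: r.2.2.1 :: r.2.2.2 :: rest ∧ Canon r ∧
        (∀ dd y, y ∈ getC r dd ↔ Reach M [z0, z1, z2, z3] dd y) := by
  by_cases h0 : ([[], [], [], []] : List (List Int)) = z0 :: z1 :: z2 :: z3 :: rest
  · injection h0 with e0 h0
    injection h0 with e1 h0
    injection h0 with e2 h0
    injection h0 with e3 e4
    subst e0; subst e1; subst e2; subst e3; subst e4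
    refine ⟨([], [], [], []), loopA_exit M _ _ _ rfl, ?_, ?_⟩
    · exact canon_intro _ List.Pairwise.nil List.Pairwise.nil List.Pairwise.nil List.Pairwise.nil
    · intro dd y
      rw [getC_all_nil]
      exact ⟨fun h => absurd h List.not_mem_nil, fun hr => (reach_nil M dd y hr).elim⟩
  · have hf : 4 * (uList (z0 :: z1 :: z2 :: z3 :: rest) M).length + 5 =
        (4 * (uList (z0 :: z1 :: z2 :: z3 :: rest) M).length + 4) + 1 := rfl
    rw [hf, loopA_succ M _ _ _ h0, stepA_cons]
    refine loopA_go M [z0, z1, z2, z3] (uList (z0 :: z1 :: z2 :: z3 :: rest) M)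
      (valsSub_uList _ M) rest _ (z0 :: z1 :: z2 :: z3 :: rest) (stepQ M (z0, z1, z2, z3))
      (fun dd y hy => stepQ_mono M _ dd y (init0 z0 z1 z2 z3 dd y hy))
      (stepQ_sound M _ _ (sound0 M z0 z1 z2 z3))
      (stepQ_canon M _)
      (stepQ_subU M _ _ (valsSub_uList _ M) (sub0 z0 z1 z2 z3 rest M))
      (stepA_cons M z0 z1 z2 z3 rest).symm
      ?_
    have := Nat.zero_le (szQ (stepQ M (z0, z1, z2, z3)))
    omega

-- ===== B side =====

lemma getC_setC_self (q : Comp4A) (d0 : Nat) (hlt : d0 < 4) (lset : PySem.Set Int) :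
    getC (setC q d0 lset) d0 = lset := by
  rcases d0 with _ | _ | _ | _ | d0
  · rfl
  · rfl
  · rfl
  · rfl
  · omega

lemma getC_setC_ne (q : Comp4A) (d0 dd : Nat) (hne : dd ≠ d0) (lset : PySem.Set Int) :
    getC (setC q d0 lset) dd = getC q dd := by
  rcases d0 with _ | _ | _ | _ | d0 <;> rcases dd with _ | _ | _ | _ | dd <;>
    first | rfl | (exact absurd rfl hne)

lemma szQ_setC_add (q : Comp4A) (d0 : Nat) (hlt : d0 < 4) (y : Int) (hy : y ∉ getC q d0) :
    szQ (setC q d0 (PySem.Set.add (getC q d0) y)) = szQ q + 1 := by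
  have hadd : PySem.Set.add (getC q d0) y = getC q d0 ++ [y] := PySem.Set.add_of_not_mem hy
  rcases d0 with _ | _ | _ | _ | d0
  · have h2 : PySem.Set.add q.1 y = q.1 ++ [y] := hadd
    simp [setC, szQ, h2]; omega
  · have h2 : PySem.Set.add q.2.1 y = q.2.1 ++ [y] := hadd
    simp [setC, szQ, h2]; omega
  · have h2 : PySem.Set.add q.2.2.1 y = q.2.2.1 ++ [y] := hadd
    simp [setC, szQ, h2]; omega
  · have h2 : PySem.Set.add q.2.2.2 y = q.2.2.2 ++ [y] := hadd
    simp [setC, szQ, h2]; omega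
  · omega

lemma fold_spec (l : List (Nat × Int)) :
    ∀ (q : Comp4A) (stack : List (Nat × Int)), (∀ p ∈ l, p.1 < 4) →
      (∀ dd y, y ∈ getC q dd → y ∈ getC (l.foldl pushNew (q, stack)).1 dd) ∧
      (∀ dd y, y ∈ getC (l.foldl pushNew (q, stack)).1 dd →
        y ∈ getC q dd ∨ ((dd, y) ∈ (l.foldl pushNew (q, stack)).2 ∧ (dd, y) ∈ l)) ∧
      (∀ p ∈ l, p.2 ∈ getC (l.foldl pushNew (q, stack)).1 p.1) ∧
      (∀ p ∈ (l.foldl pushNew (q, stack)).2, p ∈ stack ∨ p ∈ l) ∧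
      (∀ p ∈ stack, p ∈ (l.foldl pushNew (q, stack)).2) ∧
      ((l.foldl pushNew (q, stack)).2.length + szQ q = stack.length + szQ (l.foldl pushNew (q, stack)).1) ∧
      ((∀ dd, (getC q dd).Nodup) → ∀ dd, (getC (l.foldl pushNew (q, stack)).1 dd).Nodup) ∧
      szQ q ≤ szQ (l.foldl pushNew (q, stack)).1 := by
  induction l with
  | nil =>
      intro q stack _
      exact ⟨fun dd y h => h, fun dd y h => Or.inl h, by simp, fun p hp => Or.inl hp,
        fun p hp => hp, rfl, fun h => h, Nat.le_refl _⟩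
  | cons p t ih =>
      intro q stack hl
      have hp4 : p.1 < 4 := hl p (List.mem_cons_self ..)
      have ht4 : ∀ pp ∈ t, pp.1 < 4 := fun pp hpp => hl pp (List.mem_cons_of_mem _ hpp)
      simp only [List.foldl_cons]
      by_cases hmem : p.2 ∈ getC q p.1
      · have hpn : pushNew (q, stack) p = (q, stack) := by simp [pushNew, hmem]
        rw [hpn]
        obtain ⟨F1, F2, F3, F4, F5, F6, F7, F8⟩ := ih q stack ht4
        refine ⟨F1, ?_, ?_, ?_, F5, F6, F7, F8⟩
        · intro dd y h
          rcases F2 dd y h with h' | ⟨h1, h2⟩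
          · exact Or.inl h'
          · exact Or.inr ⟨h1, List.mem_cons_of_mem _ h2⟩
        · intro pp hpp
          rcases List.mem_cons.1 hpp with rfl | hpp'
          · exact F1 pp.1 pp.2 hmem
          · exact F3 pp hpp'
        · intro pp hpp
          rcases F4 pp hpp with h' | h'
          · exact Or.inl h'
          · exact Or.inr (List.mem_cons_of_mem _ h')
      · have hpn : pushNew (q, stack) p =
            (setC q p.1 (PySem.Set.add (getC q p.1) p.2), p :: stack) := by
          simp [pushNew, hmem]
        rw [hpn]
        obtain ⟨F1, F2, F3, F4, F5, F6, F7, F8⟩ := ih (setC q p.1 (PySem.Set.add (getC q p.1) p.2)) (p :: stack) ht4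
        have hq'mem : ∀ dd y, y ∈ getC (setC q p.1 (PySem.Set.add (getC q p.1) p.2)) dd ↔
            ((dd = p.1 ∧ (y ∈ getC q p.1 ∨ y = p.2)) ∨ (dd ≠ p.1 ∧ y ∈ getC q dd)) := by
          intro dd y
          by_cases hd : dd = p.1
          · subst hd
            rw [getC_setC_self _ _ hp4, PySem.Set.mem_add]
            simp
          · rw [getC_setC_ne _ _ _ hd]
            simp [hd]
        refine ⟨?_, ?_, ?_, ?_, ?_, ?_, ?_, ?_⟩
        · intro dd y h
          refine F1 dd y ((hq'mem dd y).2 ?_)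
          by_cases hd : dd = p.1
          · subst hd; exact Or.inl ⟨rfl, Or.inl h⟩
          · exact Or.inr ⟨hd, h⟩
        · intro dd y h
          rcases F2 dd y h with h' | ⟨h1, h2⟩
          · rcases (hq'mem dd y).1 h' with ⟨hd, (hold | hnew)⟩ | ⟨_, hold⟩
            · exact Or.inl (hd ▸ hold)
            · have hpe : (dd, y) = p := by rw [hd, hnew]
              refine Or.inr ⟨?_, hpe ▸ List.mem_cons_self ..⟩
              exact hpe ▸ F5 p (List.mem_cons_self ..)
            · exact Or.inl hold
          · exact Or.inr ⟨h1, List.mem_cons_of_mem _ h2⟩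
        · intro pp hpp
          rcases List.mem_cons.1 hpp with rfl | hpp'
          · exact F1 pp.1 pp.2 ((hq'mem pp.1 pp.2).2 (Or.inl ⟨rfl, Or.inr rfl⟩))
          · exact F3 pp hpp'
        · intro pp hpp
          rcases F4 pp hpp with h' | h'
          · rcases List.mem_cons.1 h' with rfl | h''
            · exact Or.inr (List.mem_cons_self ..)
            · exact Or.inl h''
          · exact Or.inr (List.mem_cons_of_mem _ h')
        · intro pp hpp
          exact F5 pp (List.mem_cons_of_mem _ hpp)
        · have hsz := szQ_setC_add q p.1 hp4 p.2 hmem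
          simp only [List.length_cons] at F6 ⊢
          omega
        · intro hn
          refine F7 (fun dd => ?_)
          by_cases hd : dd = p.1
          · subst hd
            rw [getC_setC_self _ _ hp4]
            exact PySem.Set.nodup_add _ _ (hn p.1)
          · rw [getC_setC_ne _ _ _ hd]
            exact hn dd
        · have hsz := szQ_setC_add q p.1 hp4 p.2 hmem
          omega

lemma bfs_nil (M : EMaps) (fuel : Nat) (q : Comp4A) : bfs M fuel [] q = q := by cases fuel <;> rfl

lemma bfs_succ (M : EMaps) (n : Nat) (p : Nat × Int) (rest : List (Nat × Int)) (q : Comp4A) :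
    bfs M (n + 1) (p :: rest) q =
      bfs M n ((succs M p.1 p.2).foldl pushNew (q, rest)).2
        ((succs M p.1 p.2).foldl pushNew (q, rest)).1 := rfl

lemma complete_of_closed (M : EMaps) (zs : List (List Int)) (q : Comp4A)
    (hinit : InitSub zs q)
    (hcl : ∀ dd y, y ∈ getC q dd → ∀ p ∈ succs M dd y, p.2 ∈ getC q p.1) :
    ∀ dd y, Reach M zs dd y → y ∈ getC q dd := by
  intro dd y h
  induction h with
  | base d x hx => exact hinit d x hx
  | step d y hr hs ih => exact hcl _ _ ih (d, y) hs

lemma bfs_go (M : EMaps) (zs : List (List Int)) (U : List Int) (hv : ValsSub M U) :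
    ∀ (fuel : Nat) (stack : List (Nat × Int)) (q : Comp4A),
      Sound M zs q → InitSub zs q →
      (∀ p ∈ stack, p.2 ∈ getC q p.1) →
      (∀ p ∈ stack, p.1 < 4) →
      (∀ dd y, y ∈ getC q dd → ((dd, y) ∈ stack ∨ ∀ p ∈ succs M dd y, p.2 ∈ getC q p.1)) →
      (∀ dd, (getC q dd).Nodup) → SubU q U →
      stack.length + 8 * U.length ≤ fuel + 2 * szQ q →
      (∀ dd y, y ∈ getC (bfs M fuel stack q) dd ↔ Reach M zs dd y) ∧
      (∀ dd, (getC (bfs M fuel stack q) dd).Nodup) := by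
  intro fuel
  induction fuel with
  | zero =>
      intro stack q hsound hinit hstack hlt hclosed hnodup hsub hbud
      cases stack with
      | nil =>
          rw [bfs_nil]
          refine ⟨fun dd y => ⟨fun hy => hsound dd y hy, fun hr => ?_⟩, hnodup⟩
          refine complete_of_closed M zs q hinit (fun dd y hy => ?_) dd y hr
          rcases hclosed dd y hy with hin | hcl
          · exact absurd hin List.not_mem_nil
          · exact hcl
      | cons p rest =>
          exfalso
          have := szQ_le q U hnodup hsub
          simp only [List.length_cons] at hbud
          omega
  | succ n ih =>
      intro stack q hsound hinit hstack hlt hclosed hnodup hsub hbud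
      cases stack with
      | nil =>
          rw [bfs_nil]
          refine ⟨fun dd y => ⟨fun hy => hsound dd y hy, fun hr => ?_⟩, hnodup⟩
          refine complete_of_closed M zs q hinit (fun dd y hy => ?_) dd y hr
          rcases hclosed dd y hy with hin | hcl
          · exact absurd hin List.not_mem_nil
          · exact hcl
      | cons p rest =>
          rw [bfs_succ]
          obtain ⟨F1, F2, F3, F4, F5, F6, F7, F8⟩ := fold_spec (succs M p.1 p.2) q rest
            (fun pp hpp => succs_lt M p.1 p.2 pp.1 pp.2 hpp)
          have hpq : p.2 ∈ getC q p.1 := hstack p (List.mem_cons_self ..)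
          have hpr : Reach M zs p.1 p.2 := hsound p.1 p.2 hpq
          refine ih _ _ ?_ ?_ ?_ ?_ ?_ ?_ ?_ ?_
          · -- Sound
            intro dd y h
            rcases F2 dd y h with hold | ⟨_, hl⟩
            · exact hsound dd y hold
            · exact Reach.step _ _ hpr hl
          · exact fun dd y h => F1 dd y (hinit dd y h)
          · intro pp hpp
            rcases F4 pp hpp with hin | hin
            · exact F1 _ _ (hstack pp (List.mem_cons_of_mem _ hin))
            · exact F3 pp hin
          · intro pp hpp
            rcases F4 pp hpp with hin | hin
            · exact hlt pp (List.mem_cons_of_mem _ hin)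
            · exact succs_lt M p.1 p.2 pp.1 pp.2 hin
          · -- closed off the worklist
            intro dd y h
            rcases F2 dd y h with hold | ⟨hstk, _⟩
            · rcases hclosed dd y hold with hin | hcl
              · rcases List.mem_cons.1 hin with heq | hin'
                · right
                  intro pp hpp'
                  have e1 : dd = p.1 := congrArg Prod.fst heq
                  have e2 : y = p.2 := congrArg Prod.snd heq
                  rw [e1, e2] at hpp'
                  exact F3 pp hpp'
                · left; exact F5 _ hin'
              · right; intro pp hpp'; exact F1 _ _ (hcl pp hpp')
            · left; exact hstk
          · exact F7 hnodup
          · intro dd y h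
            rcases F2 dd y h with hold | ⟨_, hl⟩
            · exact hsub dd y hold
            · exact hv p.1 p.2 dd y hl
          · have h6 := F6
            have h8 := F8
            simp only [List.length_cons] at hbud
            omega

lemma B_char (z0 z1 z2 z3 : List Int) (rest : List (List Int))
    (s_map s_map_reverse f_map f_map_reverse source2follow follow2source : List (Int × List Int)) :
    ∃ s : Comp4A,
      buildClosure_alt (z0 :: z1 :: z2 :: z3 :: rest) s_map s_map_reverse f_map f_map_reverse source2follow follow2source =
        PySem.List.sorted s.1 (fun x => x) :: PySem.List.sorted s.2.1 (fun x => x) ::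
        PySem.List.sorted s.2.2.1 (fun x => x) :: PySem.List.sorted s.2.2.2 (fun x => x) :: rest ∧
      (∀ dd y, y ∈ getC s dd ↔ Reach ⟨source2follow, s_map, follow2source, f_map, s_map_reverse, f_map_reverse⟩ [z0, z1, z2, z3] dd y) ∧
      (∀ dd, (getC s dd).Nodup) := by
  have hsound : Sound ⟨source2follow, s_map, follow2source, f_map, s_map_reverse, f_map_reverse⟩
      [z0, z1, z2, z3] (PySem.Set.ofList z0, PySem.Set.ofList z1, PySem.Set.ofList z2, PySem.Set.ofList z3) := by
    intro dd y hy
    rcases mem_getC_cases _ dd y hy with ⟨rfl, h⟩ | ⟨rfl, h⟩ | ⟨rfl, h⟩ | ⟨rfl, h⟩ <;>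
      rw [PySem.Set.mem_ofList] at h
    · exact Reach.base 0 y h
    · exact Reach.base 1 y h
    · exact Reach.base 2 y h
    · exact Reach.base 3 y h
  have hinit : InitSub [z0, z1, z2, z3]
      (PySem.Set.ofList z0, PySem.Set.ofList z1, PySem.Set.ofList z2, PySem.Set.ofList z3) := by
    intro dd y hy
    rcases mem_getD4 z0 z1 z2 z3 dd y hy with ⟨rfl, h⟩ | ⟨rfl, h⟩ | ⟨rfl, h⟩ | ⟨rfl, h⟩ <;>
      exact (PySem.Set.mem_ofList _ _).2 h
  have hstack : ∀ p ∈ z0.map (fun x => ((0 : Nat), x)) ++ z1.map (fun x => ((1 : Nat), x)) ++ z2.map (fun x => ((2 : Nat), x)) ++ z3.map (fun x => ((3 : Nat), x)),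
      p.2 ∈ getC (PySem.Set.ofList z0, PySem.Set.ofList z1, PySem.Set.ofList z2, PySem.Set.ofList z3) p.1 := by
    intro pp hpp
    simp only [List.mem_append, List.mem_map] at hpp
    rcases hpp with ((⟨x, hx, he⟩ | ⟨x, hx, he⟩) | ⟨x, hx, he⟩) | ⟨x, hx, he⟩ <;>
      rw [← he] <;> exact (PySem.Set.mem_ofList _ _).2 hx
  have hlt : ∀ p ∈ z0.map (fun x => ((0 : Nat), x)) ++ z1.map (fun x => ((1 : Nat), x)) ++ z2.map (fun x => ((2 : Nat), x)) ++ z3.map (fun x => ((3 : Nat), x)),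
      p.1 < 4 := by
    intro pp hpp
    simp only [List.mem_append, List.mem_map] at hpp
    rcases hpp with ((⟨x, hx, he⟩ | ⟨x, hx, he⟩) | ⟨x, hx, he⟩) | ⟨x, hx, he⟩ <;>
      rw [← he] <;> omega
  have hclosed : ∀ dd y, y ∈ getC (PySem.Set.ofList z0, PySem.Set.ofList z1, PySem.Set.ofList z2, PySem.Set.ofList z3) dd →
      ((dd, y) ∈ z0.map (fun x => ((0 : Nat), x)) ++ z1.map (fun x => ((1 : Nat), x)) ++ z2.map (fun x => ((2 : Nat), x)) ++ z3.map (fun x => ((3 : Nat), x)) ∨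
        ∀ p ∈ succs ⟨source2follow, s_map, follow2source, f_map, s_map_reverse, f_map_reverse⟩ dd y,
          p.2 ∈ getC (PySem.Set.ofList z0, PySem.Set.ofList z1, PySem.Set.ofList z2, PySem.Set.ofList z3) p.1) := by
    intro dd y hy
    left
    rcases mem_getC_cases _ dd y hy with ⟨rfl, h⟩ | ⟨rfl, h⟩ | ⟨rfl, h⟩ | ⟨rfl, h⟩ <;>
      rw [PySem.Set.mem_ofList] at h <;> simp only [List.mem_append, List.mem_map]
    · exact Or.inl (Or.inl (Or.inl ⟨y, h, rfl⟩))
    · exact Or.inl (Or.inl (Or.inr ⟨y, h, rfl⟩))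
    · exact Or.inl (Or.inr ⟨y, h, rfl⟩)
    · exact Or.inr ⟨y, h, rfl⟩
  have hnodup : ∀ dd, (getC (PySem.Set.ofList z0, PySem.Set.ofList z1, PySem.Set.ofList z2, PySem.Set.ofList z3) dd).Nodup :=
    nodup_intro _ (PySem.Set.nodup_ofList z0) (PySem.Set.nodup_ofList z1)
      (PySem.Set.nodup_ofList z2) (PySem.Set.nodup_ofList z3)
  have hsub : SubU (PySem.Set.ofList z0, PySem.Set.ofList z1, PySem.Set.ofList z2, PySem.Set.ofList z3)
      (uList (z0 :: z1 :: z2 :: z3 :: rest) ⟨source2follow, s_map, follow2source, f_map, s_map_reverse, f_map_reverse⟩) := by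
    intro dd y hy
    refine List.mem_append.2 (Or.inl ?_)
    rcases mem_getC_cases _ dd y hy with ⟨rfl, h⟩ | ⟨rfl, h⟩ | ⟨rfl, h⟩ | ⟨rfl, h⟩ <;>
      rw [PySem.Set.mem_ofList] at h <;> simp [List.flatten] <;> tauto
  have hbud : (z0.map (fun x => ((0 : Nat), x)) ++ z1.map (fun x => ((1 : Nat), x)) ++ z2.map (fun x => ((2 : Nat), x)) ++ z3.map (fun x => ((3 : Nat), x))).length +
      8 * (uList (z0 :: z1 :: z2 :: z3 :: rest) ⟨source2follow, s_map, follow2source, f_map, s_map_reverse, f_map_reverse⟩).length ≤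
      ((z0.map (fun x => ((0 : Nat), x)) ++ z1.map (fun x => ((1 : Nat), x)) ++ z2.map (fun x => ((2 : Nat), x)) ++ z3.map (fun x => ((3 : Nat), x))).length +
        8 * (uList (z0 :: z1 :: z2 :: z3 :: rest) ⟨source2follow, s_map, follow2source, f_map, s_map_reverse, f_map_reverse⟩).length + 1) +
      2 * szQ (PySem.Set.ofList z0, PySem.Set.ofList z1, PySem.Set.ofList z2, PySem.Set.ofList z3) := by
    have := Nat.zero_le (szQ (PySem.Set.ofList z0, PySem.Set.ofList z1, PySem.Set.ofList z2, PySem.Set.ofList z3))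
    omega
  obtain ⟨hiff, hnd⟩ :=
    bfs_go (⟨source2follow, s_map, follow2source, f_map, s_map_reverse, f_map_reverse⟩ : EMaps)
      [z0, z1, z2, z3] (uList (z0 :: z1 :: z2 :: z3 :: rest) ⟨source2follow, s_map, follow2source, f_map, s_map_reverse, f_map_reverse⟩)
      (valsSub_uList _ _)
      ((z0.map (fun x => ((0 : Nat), x)) ++ z1.map (fun x => ((1 : Nat), x)) ++ z2.map (fun x => ((2 : Nat), x)) ++ z3.map (fun x => ((3 : Nat), x))).length +
        8 * (uList (z0 :: z1 :: z2 :: z3 :: rest) ⟨source2follow, s_map, follow2source, f_map, s_map_reverse, f_map_reverse⟩).length + 1)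
      (z0.map (fun x => ((0 : Nat), x)) ++ z1.map (fun x => ((1 : Nat), x)) ++ z2.map (fun x => ((2 : Nat), x)) ++ z3.map (fun x => ((3 : Nat), x)))
      (PySem.Set.ofList z0, PySem.Set.ofList z1, PySem.Set.ofList z2, PySem.Set.ofList z3)
      hsound hinit hstack hlt hclosed hnodup hsub hbud
  exact ⟨_, rfl, hiff, hnd⟩

-- ===== VERDICT (by name: the statement is the Claim_ definition above) =====
theorem buildClosure_spec : Claim_equal_buildClosure := by
  unfold Claim_equal_buildClosure
  intro closure s_map s_map_reverse f_map f_map_reverse source2follow follow2source _ hpre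
  unfold Pre_buildClosure at hpre
  unfold Spec_buildClosure
  rcases closure with _ | ⟨z0, closure⟩
  · simp at hpre
  rcases closure with _ | ⟨z1, closure⟩
  · simp at hpre
  rcases closure with _ | ⟨z2, closure⟩
  · simp at hpre
  rcases closure with _ | ⟨z3, rest⟩
  · simp at hpre
  obtain ⟨r, hA, hAc, hAm⟩ := A_char z0 z1 z2 z3 rest
    ⟨source2follow, s_map, follow2source, f_map, s_map_reverse, f_map_reverse⟩
  obtain ⟨sB, hB, hBm, hBn⟩ := B_char z0 z1 z2 z3 rest
    s_map s_map_reverse f_map f_map_reverse source2follow follow2source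
  have hLHS : buildClosure (z0 :: z1 :: z2 :: z3 :: rest) s_map s_map_reverse f_map f_map_reverse source2follow follow2source =
      loopA ⟨source2follow, s_map, follow2source, f_map, s_map_reverse, f_map_reverse⟩
        (4 * (uList (z0 :: z1 :: z2 :: z3 :: rest)
          ⟨source2follow, s_map, follow2source, f_map, s_map_reverse, f_map_reverse⟩).length + 5)
        [[], [], [], []] (z0 :: z1 :: z2 :: z3 :: rest) := rfl
  rw [hLHS, hA, hB]
  have mk : ∀ dd : Nat, getC r dd = PySem.List.sorted (getC sB dd) (fun x => x) := by
    intro dd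
    refine eq_of_canon _ _ (hAc dd) ?_ ?_
    · exact canon_of_le_nodup (PySem.List.sorted_pairwise _ _)
        (((PySem.List.sorted_perm _ _ _).nodup_iff).2 (hBn dd))
    · intro x
      rw [PySem.List.mem_sorted]
      exact (hAm dd x).trans ((hBm dd x)).symm
  have e0 : r.1 = PySem.List.sorted sB.1 (fun x => x) := mk 0
  have e1 : r.2.1 = PySem.List.sorted sB.2.1 (fun x => x) := mk 1
  have e2 : r.2.2.1 = PySem.List.sorted sB.2.2.1 (fun x => x) := mk 2
  have e3 : r.2.2.2 = PySem.List.sorted sB.2.2.2 (fun x => x) := mk 3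
  rw [e0, e1, e2, e3]
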